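-- pv_equiv track=rewrite | github.com/NigeloYang/federated_learning_differential_privacy | algorithm/nowcoderH200/array/66-sortCows.py | sortCows
-- ===== SOURCE A (Python) =====
-- from typing import List
--
-- def sortCows(cows: List[int]) -> List[int]:
--     if not cows:
--         return []
--
--     count1 = []
--     count2 = []
--     for cow in cows:
--         if cow == 0:
--             count1.append(cow)
--         else:
--             count2.append(cow)
--     count1.extend(count2)
--     return count1
-- ===== SOURCE B (Python) =====
-- def sortCows(cows):
--     # stable sort: zeros (key False) before non-zeros (key True), relative order kept
--     return sorted(cows, key=lambda x: x != 0)
-- ===== Notes on version B (the rewrite author's own statement) =====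
-- stated objective: idiomatic
-- what changed: Replaces the manual two-list partition-and-concatenate with a single stable key-sort (sorted with key x != 0), relying on sort stability to keep zeros before non-zeros in original relative order.
import Mathlib
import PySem

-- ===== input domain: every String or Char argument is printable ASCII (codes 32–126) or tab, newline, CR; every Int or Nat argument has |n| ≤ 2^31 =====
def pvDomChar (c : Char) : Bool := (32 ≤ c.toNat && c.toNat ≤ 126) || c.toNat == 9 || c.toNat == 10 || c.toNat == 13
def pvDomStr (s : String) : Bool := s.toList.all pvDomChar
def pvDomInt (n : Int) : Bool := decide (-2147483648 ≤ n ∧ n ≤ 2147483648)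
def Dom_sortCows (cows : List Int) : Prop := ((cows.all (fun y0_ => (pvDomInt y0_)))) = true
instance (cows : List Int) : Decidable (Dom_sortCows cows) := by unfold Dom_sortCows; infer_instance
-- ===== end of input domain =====

-- B replaces A's manual two-list partition with a single stable key-sort (idiomatic, not faster).

-- ===== PORT A =====
-- literal port: empty check, then one pass appending into count1/count2, then count1.extend(count2)
def sortCows (cows : List Int) : List Int :=
  if cows = [] then []
  else
    let p := cows.foldl
      (fun (p : List Int × List Int) cow =>
        if cow = 0 then (p.1 ++ [cow], p.2) else (p.1, p.2 ++ [cow]))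
      ([], [])
    p.1 ++ p.2

-- ===== PORT B =====
-- sorted(cows, key=lambda x: x != 0)
def sortCows_alt (cows : List Int) : List Int :=
  PySem.List.sorted cows (fun x => decide (x ≠ 0))

-- ===== PRECONDITION & SPEC =====
def Spec_sortCows (cows : List Int) (out : List Int) : Prop := out = sortCows_alt cows
instance (cows : List Int) (out : List Int) : Decidable (Spec_sortCows cows out) := by unfold Spec_sortCows; infer_instance

-- ===== CLAIM (what is proved, stated in full; the proofs are below) =====
def Claim_equal_sortCows : Prop := ∀ (cows : List Int), Dom_sortCows cows → Spec_sortCows cows (sortCows cows)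

-- ===== LEMMAS AND PROOFS =====

-- A's loop accumulates exactly the zeros-filter and the nonzeros-filter of the traversed list.
theorem sortCows_foldl_eq (cows : List Int) : ∀ (c1 c2 : List Int),
    cows.foldl
      (fun (p : List Int × List Int) cow =>
        if cow = 0 then (p.1 ++ [cow], p.2) else (p.1, p.2 ++ [cow]))
      (c1, c2)
    = (c1 ++ cows.filter (fun x => decide (x = 0)),
       c2 ++ cows.filter (fun x => decide (x ≠ 0))) := by
  induction cows with
  | nil => simp
  | cons x xs ih =>
    intro c1 c2
    by_cases hx : x = 0 <;> simp [hx, ih]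

-- inserting an element walks past a prefix it does not go before
theorem insertBy_skip {α : Type} (before : α → α → Bool) (x : α) (zs ns : List α)
    (h : ∀ y ∈ zs, before x y = false) :
    PySem.List.insertBy before x (zs ++ ns) = zs ++ PySem.List.insertBy before x ns := by
  induction zs with
  | nil => simp
  | cons z zs ih =>
    have hz : before x z = false := h z (by simp)
    simp only [List.cons_append, PySem.List.insertBy, hz]
    simp [ih (fun y hy => h y (by simp [hy]))]

-- inserting an element that goes before everything lands at the head
theorem insertBy_front {α : Type} (before : α → α → Bool) (x : α) (ns : List α)
    (h : ∀ y ∈ ns, before x y = true) :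
    PySem.List.insertBy before x ns = x :: ns := by
  cases ns with
  | nil => simp [PySem.List.insertBy]
  | cons y ys => simp [PySem.List.insertBy, h y (by simp)]

-- B's insertion-sort loop maintains the partitioned shape
theorem sorted_loop_inv (cows : List Int) : ∀ (zs ns : List Int),
    (∀ y ∈ zs, y = 0) → (∀ y ∈ ns, y ≠ 0) →
    cows.foldl
      (fun acc x => PySem.List.insertBy
        (fun a b => decide ((decide (a ≠ 0)) < (decide (b ≠ 0)))) x acc)
      (zs ++ ns)
    = (zs ++ cows.filter (fun x => decide (x = 0)))
      ++ (ns ++ cows.filter (fun x => decide (x ≠ 0))) := by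
  induction cows with
  | nil => simp
  | cons x xs ih =>
    intro zs ns hz hn
    have btf : ∀ b : Bool, decide ((true : Bool) < b) = false := by decide
    by_cases hx : x = 0
    · have h1 := insertBy_skip
        (fun a b => decide ((decide (a ≠ 0)) < (decide (b ≠ 0)))) x zs ns
        (by intro y hy; have hy0 := hz y hy; subst hx hy0; decide)
      have h2 := insertBy_front
        (fun a b => decide ((decide (a ≠ 0)) < (decide (b ≠ 0)))) x ns
        (by intro y hy; have hy0 := hn y hy; simp [hx, hy0])
      simp only [List.foldl_cons, h1, h2]
      have hsh : zs ++ x :: ns = (zs ++ [x]) ++ ns := by simp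
      rw [hsh, ih (zs ++ [x]) ns
        (by intro y hy; rcases List.mem_append.mp hy with h | h
            · exact hz y h
            · simpa using List.mem_singleton.mp h ▸ hx) hn]
      simp [hx, List.append_assoc]
    · have h1 : PySem.List.insertBy
          (fun a b => decide ((decide (a ≠ 0)) < (decide (b ≠ 0)))) x (zs ++ ns)
          = (zs ++ ns) ++ [x] := by
        apply PySem.List.insertBy_of_forall_not_before
        intro y _
        simp [hx, btf]
      simp only [List.foldl_cons, h1]
      rw [List.append_assoc, ih zs (ns ++ [x]) hz
        (by intro y hy; rcases List.mem_append.mp hy with h | h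
            · exact hn y h
            · simpa using List.mem_singleton.mp h ▸ hx)]
      simp [hx, List.append_assoc]

theorem sortCows_alt_eq (cows : List Int) :
    sortCows_alt cows
      = cows.filter (fun x => decide (x = 0)) ++ cows.filter (fun x => decide (x ≠ 0)) := by
  have := sorted_loop_inv cows [] [] (by simp) (by simp)
  simpa [sortCows_alt, PySem.List.sorted] using this

-- ===== VERDICT (by name: the statement is the Claim_ definition above) =====
theorem sortCows_spec : Claim_equal_sortCows := by
  intro cows _
  unfold Spec_sortCows sortCows
  rw [sortCows_alt_eq]
  by_cases h : cows = []
  · simp [h]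
  · simp only [h, if_false]
    rw [sortCows_foldl_eq cows [] []]
    simp
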